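-- pv_equiv track=rewrite | github.com/bennettzug/CS_2435 | lab06/chess.py | king_finder
-- ===== SOURCE A (Python) =====
-- def king_finder(board: list) -> tuple[int, int]:
--     """Takes in the board, and returns the position of the black king."""
--     king_y = 0
--     king_x = 0
--     for i, elem in enumerate(board):
--         if elem.find("k") != -1:
--             king_x = elem.find("k")
--             king_y = i
--     return king_y, king_x
-- ===== SOURCE B (Python) =====
-- def king_finder(board: list) -> tuple[int, int]:
--     """Takes in the board, and returns the position of the black king."""
--     for i in range(len(board) - 1, -1, -1):
--         j = board[i].find("k")
--         if j != -1:
--             return i, j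
--     return 0, 0
-- ===== Notes on version B (the rewrite author's own statement) =====
-- stated objective: alternative
-- what changed: Replaces the forward scan that overwrites a running (y,x) on every matching row with a bottom-up scan that early-exits at the first row containing 'k' (the last one overall), maintaining no state and calling find once per row.
import Mathlib
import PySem

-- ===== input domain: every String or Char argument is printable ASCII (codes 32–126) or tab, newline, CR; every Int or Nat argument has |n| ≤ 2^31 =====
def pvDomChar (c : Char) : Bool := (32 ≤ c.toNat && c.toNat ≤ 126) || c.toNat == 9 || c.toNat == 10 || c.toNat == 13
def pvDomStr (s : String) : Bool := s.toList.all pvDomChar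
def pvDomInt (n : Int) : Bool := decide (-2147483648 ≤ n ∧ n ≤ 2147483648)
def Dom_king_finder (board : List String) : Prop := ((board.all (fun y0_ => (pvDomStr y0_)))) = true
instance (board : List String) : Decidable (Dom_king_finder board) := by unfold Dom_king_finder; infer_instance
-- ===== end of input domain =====

-- B changes the decomposition: a bottom-up scan with early exit instead of A's forward scan with an overwritten accumulator.

-- ===== PORT A =====
def king_finder (board : List String) : Int × Int :=
  (PySem.List.enumerate board).foldl
    (fun acc p =>
      if PySem.Str.find p.2 "k" ≠ -1 then (p.1, PySem.Str.find p.2 "k") else acc)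
    ((0 : Int), (0 : Int))

-- ===== PORT B =====
def kfRevScan : List (Int × String) → Int × Int
  | [] => ((0 : Int), (0 : Int))
  | (i, s) :: rest =>
      let j := PySem.Str.find s "k"
      if j ≠ -1 then (i, j) else kfRevScan rest

def king_finder_alt (board : List String) : Int × Int :=
  kfRevScan (PySem.List.enumerate board).reverse

-- ===== PRECONDITION & SPEC =====
def Spec_king_finder (board : List String) (out : Int × Int) : Prop := out = king_finder_alt board
instance (board : List String) (out : Int × Int) : Decidable (Spec_king_finder board out) := by unfold Spec_king_finder; infer_instance

-- ===== CLAIM (what is proved, stated in full; the proofs are below) =====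
def Claim_equal_king_finder : Prop := ∀ (board : List String), Dom_king_finder board → Spec_king_finder board (king_finder board)

-- ===== LEMMAS AND PROOFS =====
theorem kf_foldl_eq_revScan (l : List (Int × String)) :
    l.foldl
      (fun acc p =>
        if PySem.Str.find p.2 "k" ≠ -1 then (p.1, PySem.Str.find p.2 "k") else acc)
      ((0 : Int), (0 : Int)) = kfRevScan l.reverse := by
  induction l using List.reverseRecOn with
  | nil => simp [kfRevScan]
  | append_singleton l x ih =>
      rcases x with ⟨i, s⟩
      rw [List.foldl_append, ih]
      simp only [List.foldl_cons, List.foldl_nil, List.reverse_append, List.reverse_singleton,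
        List.singleton_append, kfRevScan]

-- ===== VERDICT (by name: the statement is the Claim_ definition above) =====
theorem king_finder_spec : Claim_equal_king_finder := by
  intro board _
  unfold Spec_king_finder king_finder king_finder_alt
  exact kf_foldl_eq_revScan _
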